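-- pv_equiv track=rewrite | github.com/netra-systems/zen | test_framework/archived/experimental/failure_patterns.py | _identify_flaky_tests
-- ===== SOURCE A (Python) =====
-- from collections import defaultdict
-- from typing import Any, Dict, List
--
-- def _identify_flaky_tests(test_results: List[Dict]) -> List[str]:
--     """Identify tests with inconsistent results"""
--     test_results_by_name = defaultdict(list)
--     for result in test_results:
--         test_results_by_name[result.get("name", "")].append(result.get("status"))
--
--     flaky_tests = []
--     for test_name, statuses in test_results_by_name.items():
--         if len(set(statuses)) > 1:  # Mixed results
--             flaky_tests.append(test_name)
--
--     return flaky_tests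
-- ===== SOURCE B (Python) =====
-- def _identify_flaky_tests(test_results):
--     """Identify tests with inconsistent results (one pass, no per-name status lists)"""
--     first_status = {}
--     flaky = set()
--     for result in test_results:
--         name = result.get("name", "")
--         status = result.get("status")
--         if name not in first_status:
--             first_status[name] = status
--         elif status != first_status[name]:
--             flaky.add(name)
--     return [name for name in first_status if name in flaky]
-- ===== Notes on version B (the rewrite author's own statement) =====
-- stated objective: alternative
-- what changed: Single pass keeping only the first-seen status per name plus a 'disagreed' set, instead of grouping all statuses per name into lists and calling set() on each group afterwards.
import Mathlib
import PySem

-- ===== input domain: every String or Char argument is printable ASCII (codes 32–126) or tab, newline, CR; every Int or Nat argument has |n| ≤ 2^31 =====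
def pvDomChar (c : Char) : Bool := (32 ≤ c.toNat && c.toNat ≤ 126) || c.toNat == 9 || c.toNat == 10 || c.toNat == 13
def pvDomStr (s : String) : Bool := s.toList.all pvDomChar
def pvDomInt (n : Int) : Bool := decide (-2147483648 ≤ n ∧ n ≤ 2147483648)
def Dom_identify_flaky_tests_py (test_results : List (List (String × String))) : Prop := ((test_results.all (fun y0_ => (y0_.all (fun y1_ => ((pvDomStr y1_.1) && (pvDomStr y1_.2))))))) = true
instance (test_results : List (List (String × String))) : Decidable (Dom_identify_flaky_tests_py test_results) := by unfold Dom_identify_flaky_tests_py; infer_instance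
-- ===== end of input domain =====

-- B keeps only the first-seen status per name plus a set of names that later disagreed,
-- instead of A's per-name status lists with a set() cardinality test per group.

-- ===== PORT A =====
-- groups each result's status (result.get("status") : Option String) under result.get("name",""),
-- then collects the names whose status list has more than one distinct value
def identify_flaky_tests_py (test_results : List (List (String × String))) : List String :=
  let test_results_by_name : PySem.Dict String (List (Option String)) :=
    test_results.foldl
      (fun d result =>
        d.modify ((PySem.Dict.mk result).getD "name" "") []
          (· ++ [(PySem.Dict.mk result).get? "status"]))
      PySem.Dict.empty
  test_results_by_name.items.foldl
    (fun flaky_tests p =>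
      if 1 < (PySem.Set.ofList p.2).length then flaky_tests ++ [p.1] else flaky_tests)
    []

-- ===== PORT B =====
-- one pass: first_status (dict name → first-seen status) and flaky (set of names that disagreed later)
def identify_flaky_tests_py_alt (test_results : List (List (String × String))) : List String :=
  let st : PySem.Dict String (Option String) × PySem.Set String :=
    test_results.foldl
      (fun st result =>
        let name := (PySem.Dict.mk result).getD "name" ""
        let status := (PySem.Dict.mk result).get? "status"
        match st.1.get? name with
        | none => (st.1.insert name status, st.2)
        | some s0 => if status ≠ s0 then (st.1, st.2.add name) else st)
      (PySem.Dict.empty, PySem.Set.empty)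
  st.1.keys.filter (fun name => PySem.Set.contains st.2 name)

-- ===== PRECONDITION & SPEC =====
def Spec_identify_flaky_tests_py (test_results : List (List (String × String))) (out : List String) : Prop := out = identify_flaky_tests_py_alt test_results
instance (test_results : List (List (String × String))) (out : List String) : Decidable (Spec_identify_flaky_tests_py test_results out) := by unfold Spec_identify_flaky_tests_py; infer_instance

-- ===== CLAIM (what is proved, stated in full; the proofs are below) =====
def Claim_equal_identify_flaky_tests_py : Prop := ∀ (test_results : List (List (String × String))), Dom_identify_flaky_tests_py test_results → Spec_identify_flaky_tests_py test_results (identify_flaky_tests_py test_results)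

-- ===== LEMMAS AND PROOFS =====

-- the (name, status) pair a result contributes in both programs
def pvPair (result : List (String × String)) : String × Option String :=
  ((PySem.Dict.mk result).getD "name" "", (PySem.Dict.mk result).get? "status")

-- statuses recorded under name n by a pair list
def pvSts (l : List (String × Option String)) (n : String) : List (Option String) :=
  (l.filter (fun p => p.1 == n)).map (·.2)

-- B's loop state after processing pair list l
def pvB (l : List (String × Option String)) :
    PySem.Dict String (Option String) × PySem.Set String :=
  l.foldl
    (fun st p =>
      match st.1.get? p.1 with
      | none => (st.1.insert p.1 p.2, st.2)
      | some s0 => if p.2 ≠ s0 then (st.1, st.2.add p.1) else st)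
    (PySem.Dict.empty, PySem.Set.empty)

theorem pvSts_append (l : List (String × Option String)) (p : String × Option String)
    (n : String) :
    pvSts (l ++ [p]) n = pvSts l n ++ (if p.1 = n then [p.2] else []) := by
  simp [pvSts, List.filter_append]
  split_ifs with h <;> simp [h]

theorem pvSts_ne_nil_of_mem {l : List (String × Option String)} {n : String}
    (h : n ∈ l.map (·.1)) : pvSts l n ≠ [] := by
  rcases List.mem_map.mp h with ⟨q, hq, hq1⟩
  intro hnil
  have : q.2 ∈ pvSts l n := by
    simp only [pvSts, List.mem_map, List.mem_filter]
    exact ⟨q, ⟨hq, by simp [hq1]⟩, rfl⟩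
  simp [hnil] at this

-- the full invariant of B's loop
theorem pvB_inv (l : List (String × Option String)) :
    (∀ n, (pvB l).1.get? n = (pvSts l n).head?) ∧
    (pvB l).1.keys = PySem.Set.ofList (l.map (·.1)) ∧
    (∀ n, n ∈ (pvB l).2 ↔ ∃ s ∈ pvSts l n, (pvSts l n).head? ≠ some s) := by
  induction l using List.reverseRecOn with
  | nil =>
    refine ⟨fun n => rfl, rfl, fun n => ?_⟩
    simp [pvB, pvSts, PySem.Set.empty]
  | append_singleton l p ih =>
    obtain ⟨ih1, ih2, ih3⟩ := ih
    have hmemfst : p.1 ∈ l.map (·.1) → pvSts l p.1 ≠ [] := fun h => pvSts_ne_nil_of_mem h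
    have hfstmem : pvSts l p.1 ≠ [] → p.1 ∈ l.map (·.1) := by
      intro h
      rcases List.exists_mem_of_ne_nil _ h with ⟨s, hs⟩
      simp only [pvSts, List.mem_map, List.mem_filter] at hs
      rcases hs with ⟨q, ⟨hq, hq1⟩, _⟩
      exact List.mem_map.mpr ⟨q, hq, by simpa using hq1⟩
    have hstep0 : pvB (l ++ [p]) =
        (match (pvB l).1.get? p.1 with
        | none => ((pvB l).1.insert p.1 p.2, (pvB l).2)
        | some s0 => if p.2 ≠ s0 then ((pvB l).1, (pvB l).2.add p.1) else pvB l) := by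
      unfold pvB
      rw [List.foldl_append]
      rfl
    rcases hg : (pvB l).1.get? p.1 with _ | s0
    · -- first occurrence of p.1
      have hemp : pvSts l p.1 = [] := by
        have h1 := ih1 p.1; rw [hg] at h1
        cases h : pvSts l p.1 with
        | nil => rfl
        | cons a t => rw [h] at h1; simp at h1
      have hnotmem : p.1 ∉ l.map (·.1) := fun h => hmemfst h hemp
      have hstep : pvB (l ++ [p]) = ((pvB l).1.insert p.1 p.2, (pvB l).2) := by
        rw [hstep0, hg]
      rw [hstep]
      refine ⟨?_, ?_, ?_⟩
      · intro n
        rw [PySem.Dict.get?_insert]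
        by_cases hn : n = p.1
        · rw [hn, pvSts_append, hemp]; simp
        · simp [hn, ih1 n, pvSts_append, Ne.symm hn]
      · show ((pvB l).1.insert p.1 p.2).keys = _
        rw [PySem.Dict.keys_insert_of_not_contains _ _
            (by rw [PySem.Dict.contains_eq_isSome_get?, hg]; rfl),
          ih2]
        simp only [List.map_append, List.map_cons, List.map_nil]
        rw [PySem.Set.ofList_append_singleton,
          PySem.Set.add_of_not_mem (by rwa [PySem.Set.mem_ofList])]
      · intro n
        by_cases hn : n = p.1
        · rw [hn, ih3 p.1, hemp, pvSts_append, hemp]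
          simp
        · rw [ih3 n]; simp [pvSts_append, Ne.symm hn]
    · -- p.1 already seen, first status s0
      have hhead : (pvSts l p.1).head? = some s0 := by rw [← ih1 p.1, hg]
      have hne' : pvSts l p.1 ≠ [] := by intro h; rw [h] at hhead; simp at hhead
      have hmem : p.1 ∈ l.map (·.1) := hfstmem hne'
      have hkeysapp : PySem.Set.ofList ((l ++ [p]).map (·.1)) =
          PySem.Set.ofList (l.map (·.1)) := by
        simp only [List.map_append, List.map_cons, List.map_nil]
        rw [PySem.Set.ofList_append_singleton,
          PySem.Set.add_of_mem (by rwa [PySem.Set.mem_ofList])]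
      have hget_eq : ∀ n, ((pvB l).1).get? n = (pvSts (l ++ [p]) n).head? := by
        intro n
        by_cases hn : n = p.1
        · rw [hn, hg, pvSts_append]
          cases h : pvSts l p.1 with
          | nil => exact absurd h hne'
          | cons a t => rw [h] at hhead; simp at hhead; simp [hhead]
        · rw [ih1 n, pvSts_append]; simp [Ne.symm hn]
      by_cases hne : p.2 ≠ s0
      · have hstep : pvB (l ++ [p]) = ((pvB l).1, (pvB l).2.add p.1) := by
          rw [hstep0, hg]
          simp [hne]
        rw [hstep]
        refine ⟨hget_eq, by rw [hkeysapp]; exact ih2, ?_⟩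
        intro n
        rw [PySem.Set.mem_add]
        by_cases hn : n = p.1
        · rw [hn]
          constructor
          · intro _
            refine ⟨p.2, by simp [pvSts_append], ?_⟩
            rw [pvSts_append]
            cases h : pvSts l p.1 with
            | nil => exact absurd h hne'
            | cons a t =>
              rw [h] at hhead; simp at hhead
              simp [hhead]
              exact fun hc => hne hc.symm
          · intro _; right; rfl
        · rw [ih3 n]; simp [pvSts_append, Ne.symm hn, hn]
      · rw [not_not] at hne
        have hstep : pvB (l ++ [p]) = pvB l := by
          rw [hstep0, hg]
          simp [hne]
        rw [hstep]
        refine ⟨hget_eq, by rw [hkeysapp]; exact ih2, ?_⟩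
        intro n
        by_cases hn : n = p.1
        · rw [hn, ih3 p.1, pvSts_append]
          cases h : pvSts l p.1 with
          | nil => exact absurd h hne'
          | cons a t =>
            rw [h] at hhead; simp at hhead
            rw [hhead, hne]
            simp only [List.head?_cons, List.head?_append]
            constructor
            · rintro ⟨s, hs, hne2⟩
              exact ⟨s, List.mem_append_left _ hs, hne2⟩
            · rintro ⟨s, hs, hne2⟩
              rcases List.mem_append.mp hs with hs | hs
              · exact ⟨s, hs, hne2⟩
              · simp at hs
                rw [hs] at hne2
                simp at hne2
        · rw [ih3 n]; simp [pvSts_append, Ne.symm hn]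

-- a nonempty status list has more than one distinct value iff some element differs from the head
theorem pvMixed_iff (lst : List (Option String)) (h : lst ≠ []) :
    (1 < (PySem.Set.ofList lst).length) ↔ ∃ s ∈ lst, lst.head? ≠ some s := by
  cases lst with
  | nil => exact absurd rfl h
  | cons a t =>
    rw [PySem.Set.ofList_cons]
    simp only [List.length_cons, List.head?_cons]
    constructor
    · intro hlen
      have : ((PySem.Set.ofList t).discard a) ≠ [] := by
        intro hnil; rw [hnil] at hlen; simp at hlen
      rcases List.exists_mem_of_ne_nil _ this with ⟨s, hs⟩
      rw [PySem.Set.mem_discard] at hs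
      exact ⟨s, by simp [PySem.Set.mem_ofList] at hs; tauto,
        by simpa using fun hc => hs.2 hc.symm⟩
    · rintro ⟨s, hs, hne⟩
      simp at hne
      have hs' : s ∈ t := by
        rcases List.mem_cons.mp hs with h1 | h1
        · exact absurd h1.symm hne
        · exact h1
      have : s ∈ (PySem.Set.ofList t).discard a := by
        rw [PySem.Set.mem_discard, PySem.Set.mem_ofList]
        exact ⟨hs', fun hc => hne hc.symm⟩
      have := List.length_pos_of_mem this
      omega

-- A's output, characterised
theorem pvA_eq (test_results : List (List (String × String))) :
    identify_flaky_tests_py test_results =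
      (PySem.Set.ofList ((test_results.map pvPair).map (·.1))).filter
        (fun n => 1 < (PySem.Set.ofList (pvSts (test_results.map pvPair) n)).length) := by
  unfold identify_flaky_tests_py
  dsimp only
  set l := test_results.map pvPair with hl
  have hfold : test_results.foldl
      (fun d result => d.modify ((PySem.Dict.mk result).getD "name" "") []
        (· ++ [(PySem.Dict.mk result).get? "status"])) PySem.Dict.empty
      = l.foldl (fun d p => d.modify p.1 [] (· ++ [p.2])) PySem.Dict.empty := by
    rw [hl, List.foldl_map]; rfl
  rw [hfold]
  set d := l.foldl (fun d p => d.modify p.1 [] (· ++ [p.2])) PySem.Dict.empty with hd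
  have hkeys : d.keys = PySem.Set.ofList (l.map (·.1)) := by
    rw [hd]
    have := PySem.Dict.keys_foldl_modify_key l (·.1) ([] : List (Option String))
      (fun _ p => (· ++ [p.2])) PySem.Dict.empty
    rw [this, PySem.Dict.keys_empty, PySem.Set.update_nil_left]
  have hnd : d.keys.Nodup := by
    rw [hd]
    exact PySem.Dict.nodup_keys_foldl_modify_key l (·.1) ([] : List (Option String))
      (fun _ p => (· ++ [p.2])) PySem.Dict.empty (by simp [PySem.Dict.keys_empty])
  have hgetD : ∀ n, d.getD n [] = pvSts l n := by
    intro n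
    rw [hd, PySem.Dict.getD_foldl_modify_append, PySem.Dict.getD_empty]
    rfl
  have hitems : d.items = d.keys.map (fun k => (k, pvSts l k)) := by
    rw [PySem.Dict.items_eq_map_keys d hnd []]
    exact List.map_congr_left (fun k _ => by rw [hgetD])
  rw [hitems]
  have hfa := PySem.List.foldl_append_if
      (fun (p : String × List (Option String)) => decide (1 < (PySem.Set.ofList p.2).length))
      (·.1) (d.keys.map (fun k => (k, pvSts l k))) []
  simp only [decide_eq_true_eq] at hfa
  rw [hfa, List.filter_map, List.map_map]
  simp only [Function.comp_def]
  rw [hkeys]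
  simp

-- B's output, characterised
theorem pvB_eq (test_results : List (List (String × String))) :
    identify_flaky_tests_py_alt test_results =
      (PySem.Set.ofList ((test_results.map pvPair).map (·.1))).filter
        (fun n => decide (∃ s ∈ pvSts (test_results.map pvPair) n,
          (pvSts (test_results.map pvPair) n).head? ≠ some s)) := by
  unfold identify_flaky_tests_py_alt
  dsimp only
  set l := test_results.map pvPair with hl
  have hfold : test_results.foldl
      (fun st result =>
        let name := (PySem.Dict.mk result).getD "name" ""
        let status := (PySem.Dict.mk result).get? "status"
        match st.1.get? name with
        | none => (st.1.insert name status, st.2)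
        | some s0 => if status ≠ s0 then (st.1, st.2.add name) else st)
      (PySem.Dict.empty, PySem.Set.empty) = pvB l := by
    rw [hl, pvB, List.foldl_map]; rfl
  rw [hfold]
  obtain ⟨_, h2, h3⟩ := pvB_inv l
  rw [h2]
  exact List.filter_congr (fun n _ => by
    rw [Bool.eq_iff_iff]
    simp only [PySem.Set.contains_iff, decide_eq_true_eq]
    exact h3 n)

-- ===== VERDICT (by name: the statement is the Claim_ definition above) =====
theorem identify_flaky_tests_py_spec : Claim_equal_identify_flaky_tests_py := by
  intro test_results _
  unfold Spec_identify_flaky_tests_py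
  rw [pvA_eq, pvB_eq]
  exact List.filter_congr (fun n hn => by
    rw [decide_eq_decide]
    exact pvMixed_iff _ (pvSts_ne_nil_of_mem (by
      rwa [PySem.Set.mem_ofList] at hn)))
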